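-- pv_equiv track=rewrite | github.com/autistic-symposium/web3-toolkit-py | emotive.io/1.py | deduplicate_copilots_ids
-- ===== SOURCE A (Python) =====
-- def deduplicate_copilots_ids(id_list):
--     ''' Take an array of unsorted integer IDs and use sequential
--     addition to deduplicate. Returns a sorted list of these IDs.'''
--
--     aux_dict = {}
--     for k in id_list:
--         if k in aux_dict.keys():
--             aux_dict[k] = aux_dict[k] + 1
--         else:
--             aux_dict[k] = 1
--
--     new_list = []
--     for key, value in aux_dict.items():
--         for i in range(0, value):
--             new_list.append(key + i)
--
--     # Note: sorted() used Timsort algorithm, which is nLog(n)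
--     return sorted(new_list)
-- ===== SOURCE B (Python) =====
-- def deduplicate_copilots_ids(id_list):
--     '''Sort first, then walk runs of equal values; each run of value v with
--     length c contributes v, v+1, ..., v+c-1. Final sort is still needed since
--     expansions of adjacent values may interleave.'''
--     s = sorted(id_list)
--     new_list = []
--     i = 0
--     n = len(s)
--     while i < n:
--         v = s[i]
--         j = i + 1
--         while j < n and s[j] == v:
--             j += 1
--         new_list.extend(range(v, v + (j - i)))
--         i = j
--     return sorted(new_list)
-- ===== Notes on version B (the rewrite author's own statement) =====
-- stated objective: alternative
-- what changed: Replaces the hash-map counting pass (dict of counts, then expansion over dict items) by sort-then-scan: sort the input once and walk maximal runs of equal values, expanding each run of value v and length c to v..v+c-1 directly.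
import Mathlib
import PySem

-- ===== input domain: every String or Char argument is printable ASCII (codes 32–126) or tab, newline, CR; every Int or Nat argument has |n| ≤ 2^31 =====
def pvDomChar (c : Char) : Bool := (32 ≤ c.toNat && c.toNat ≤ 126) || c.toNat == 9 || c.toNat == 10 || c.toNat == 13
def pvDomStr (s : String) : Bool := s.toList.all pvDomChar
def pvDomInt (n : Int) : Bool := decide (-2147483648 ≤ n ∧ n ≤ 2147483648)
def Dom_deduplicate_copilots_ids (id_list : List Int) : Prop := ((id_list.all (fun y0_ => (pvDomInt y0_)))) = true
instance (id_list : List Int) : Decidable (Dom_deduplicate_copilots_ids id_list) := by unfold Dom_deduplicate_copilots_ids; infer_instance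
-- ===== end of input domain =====

-- B replaces A's dict-counting pass with sort-then-scan over runs of equal values (objective: alternative algorithm of similar cost).


-- ===== PORT A =====
-- Port of A: count occurrences into an insertion-ordered dict, expand each
-- (key, count) item to key, key+1, ..., key+count-1, then sort.
-- (aux_dict[k] inside the contains-guarded branch is ported as getD k 0: exact there, since the key is present.)
def deduplicate_copilots_ids (id_list : List Int) : List Int :=
  let aux_dict := id_list.foldl
    (fun d k => if d.contains k then d.insert k (d.getD k 0 + 1) else d.insert k 1)
    PySem.Dict.empty
  let new_list := aux_dict.items.foldl
    (fun acc kv => (PySem.List.pyRange 0 kv.2 1).foldl (fun acc2 i => acc2 ++ [kv.1 + i]) acc)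
    []
  PySem.List.sorted new_list (fun x => x) false

-- ===== PORT B =====
-- B: sort first, then walk maximal runs of equal values (the outer while loop of
-- Source B = recursion on the remaining suffix; the inner while = takeWhile/dropWhile),
-- expanding a run of value x and length c to x..x+c-1; sort the result.
def pvExpandRuns (l : List Int) : List Int :=
  match l with
  | [] => []
  | x :: rest =>
    PySem.List.pyRange x (x + (((rest.takeWhile (fun y => y == x)).length : Int) + 1)) 1
      ++ pvExpandRuns (rest.dropWhile (fun y => y == x))
termination_by l.length
decreasing_by
  simpa using Nat.lt_succ_of_le (List.length_dropWhile_le _ _)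

def deduplicate_copilots_ids_alt (id_list : List Int) : List Int :=
  PySem.List.sorted (pvExpandRuns (PySem.List.sorted id_list (fun x => x) false)) (fun x => x) false

-- ===== PRECONDITION & SPEC =====
def Spec_deduplicate_copilots_ids (id_list : List Int) (out : List Int) : Prop := out = deduplicate_copilots_ids_alt id_list
instance (id_list : List Int) (out : List Int) : Decidable (Spec_deduplicate_copilots_ids id_list out) := by unfold Spec_deduplicate_copilots_ids; infer_instance

-- ===== CLAIM (what is proved, stated in full; the proofs are below) =====
def Claim_equal_deduplicate_copilots_ids : Prop := ∀ (id_list : List Int), Dom_deduplicate_copilots_ids id_list → Spec_deduplicate_copilots_ids id_list (deduplicate_copilots_ids id_list)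

-- ===== LEMMAS AND PROOFS =====

-- canonical expansion of one key with count c
def pvF (k : Int) (c : Nat) : List Int := (List.range c).map (fun (i : Nat) => k + (i : Int))

lemma pvF_succ (a : Int) (n : Nat) : pvF a (n + 1) = a :: pvF (a + 1) n := by
  unfold pvF
  rw [List.range_succ_eq_map, List.map_cons, List.map_map]
  refine congrArg₂ List.cons (by simp) (List.map_congr_left fun i _ => ?_)
  simp only [Function.comp_apply, Nat.succ_eq_add_one]
  push_cast; ring

lemma pvRange_shift (c : Nat) : ∀ (a : Int), PySem.List.pyRange a (a + (c : Int)) 1 = pvF a c := by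
  induction c with
  | zero => intro a; simp [pvF, PySem.List.pyRange]
  | succ n ih =>
    intro a
    rw [PySem.List.pyRange_one_cons (by omega)]
    have h1 : a + ((n + 1 : Nat) : Int) = (a + 1) + (n : Int) := by push_cast; ring
    rw [h1, ih (a + 1), pvF_succ]

lemma pvA_fold_eq_counter (xs : List Int) :
    xs.foldl (fun d k => if d.contains k then d.insert k (d.getD k 0 + 1) else d.insert k 1)
      PySem.Dict.empty = PySem.Dict.counter xs := by
  rw [← PySem.Dict.foldl_insert_getD_add_one_eq_counter]
  congr 1
  funext d k
  by_cases h : d.contains k = true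
  · simp [h]
  · simp only [Bool.not_eq_true] at h
    rw [if_neg (by simp [h]), PySem.Dict.getD_of_not_contains d 0 h, zero_add]

-- A's value as a flatMap over the distinct elements
lemma pvA_eq (xs : List Int) :
    deduplicate_copilots_ids xs =
      PySem.List.sorted
        ((PySem.Set.ofList xs).flatMap (fun k => pvF k (List.count k xs))) (fun x => x) false := by
  unfold deduplicate_copilots_ids
  dsimp only
  rw [pvA_fold_eq_counter]
  congr 1
  have hstep : ∀ (acc : List Int) (kv : Int × Int),
      (PySem.List.pyRange 0 kv.2 1).foldl (fun acc2 i => acc2 ++ [kv.1 + i]) acc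
        = acc ++ (PySem.List.pyRange 0 kv.2 1).map (fun i => kv.1 + i) :=
    fun acc kv => PySem.List.foldl_append_singleton_eq_map _ _ _
  calc ((PySem.Dict.counter xs).items.foldl
          (fun acc kv => (PySem.List.pyRange 0 kv.2 1).foldl (fun acc2 i => acc2 ++ [kv.1 + i]) acc) [])
      = (PySem.Dict.counter xs).items.foldl
          (fun acc kv => acc ++ (PySem.List.pyRange 0 kv.2 1).map (fun i => kv.1 + i)) [] := by
        exact PySem.List.foldl_congr_mem _ _ _ _ (fun acc kv _ => hstep acc kv)
    _ = (PySem.Dict.counter xs).items.flatMap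
          (fun kv => (PySem.List.pyRange 0 kv.2 1).map (fun i => kv.1 + i)) := by
        simpa using PySem.List.foldl_append_eq_flatMap
          (fun kv : Int × Int => (PySem.List.pyRange 0 kv.2 1).map (fun i => kv.1 + i))
          (PySem.Dict.counter xs).items []
    _ = (PySem.Set.ofList xs).flatMap (fun k => pvF k (List.count k xs)) := by
        rw [PySem.Dict.items_counter, List.flatMap_map]
        refine List.flatMap_congr (fun k _ => ?_)
        rw [PySem.List.pyRange_zero_natCast, List.map_map]
        simp [pvF, Function.comp_def]

-- in a ≤-sorted list with head x, everything the head's run leaves behind is > x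
lemma pv_drop_gt (x : Int) : ∀ (l : List Int), l.Pairwise (· ≤ ·) → (∀ y ∈ l, x ≤ y) →
    ∀ y ∈ l.dropWhile (fun y => y == x), x < y := by
  intro l
  induction l with
  | nil => intro _ _ y hy; simp [List.dropWhile] at hy
  | cons z t ih =>
    intro hp hle y hy
    rw [List.pairwise_cons] at hp
    by_cases hz : (z == x) = true
    · rw [List.dropWhile_cons, if_pos hz] at hy
      have hzx : z = x := by simpa using hz
      exact ih hp.2 (fun w hw => hzx ▸ hp.1 w hw) y hy
    · rw [List.dropWhile_cons, if_neg hz] at hy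
      have hzx : z ≠ x := by simpa using hz
      have hxz : x < z := lt_of_le_of_ne (hle z (by simp)) (Ne.symm hzx)
      rcases List.mem_cons.mp hy with rfl | hy
      · exact hxz
      · exact lt_of_lt_of_le hxz (hp.1 y hy)

lemma pv_run_eq (x : Int) (l : List Int) : ∀ y ∈ l.takeWhile (fun y => y == x), y = x := by
  intro y hy
  simpa using List.mem_takeWhile_imp hy

-- key lemma: on a ≤-sorted list, B's run expansion is a permutation of A's per-key expansion
lemma pvExpandRuns_perm : ∀ (l : List Int), l.Pairwise (· ≤ ·) →
    (pvExpandRuns l).Perm ((PySem.Set.ofList l).flatMap (fun k => pvF k (List.count k l))) := by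
  intro l
  induction l using pvExpandRuns.induct with
  | case1 => intro _; simp [pvExpandRuns, PySem.Set.ofList]
  | case2 x rest ih =>
    intro hp
    set run := rest.takeWhile (fun y => y == x) with hrun
    set drop := rest.dropWhile (fun y => y == x) with hdrop
    have hsplit : run ++ drop = rest := List.takeWhile_append_dropWhile
    have hpr : rest.Pairwise (· ≤ ·) := (List.pairwise_cons.mp hp).2
    have hle : ∀ y ∈ rest, x ≤ y := (List.pairwise_cons.mp hp).1
    have hgt : ∀ y ∈ drop, x < y := pv_drop_gt x rest hpr hle
    have hxnd : x ∉ drop := fun h => lt_irrefl x (hgt x h)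
    have hpd : drop.Pairwise (· ≤ ·) := List.Pairwise.sublist (List.dropWhile_sublist _) hpr
    have hrx : ∀ y ∈ run, y = x := pv_run_eq x rest
    -- counts
    have hcx : List.count x (x :: rest) = run.length + 1 := by
      rw [List.count_cons_self, ← hsplit, List.count_append]
      have h1 : List.count x run = run.length := by
        rw [List.count_eq_length]
        intro y hy; simpa using (hrx y hy).symm
      have h2 : List.count x drop = 0 := List.count_eq_zero.mpr hxnd
      omega
    have hck : ∀ k ∈ drop, List.count k (x :: rest) = List.count k drop := by
      intro k hk
      have hkx : k ≠ x := fun h => lt_irrefl x (h ▸ hgt k hk)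
      rw [List.count_cons_of_ne (Ne.symm hkx), ← hsplit, List.count_append]
      have : List.count k run = 0 := by
        rw [List.count_eq_zero]
        intro h; exact hkx (hrx k h)
      omega
    -- the distinct elements of x :: rest, up to permutation
    have hperm : (PySem.Set.ofList (x :: rest) : List Int).Perm (x :: (PySem.Set.ofList drop : List Int)) := by
      rw [List.perm_ext_iff_of_nodup (PySem.Set.nodup_ofList _)
        (List.nodup_cons.mpr ⟨fun h => hxnd ((PySem.Set.mem_ofList drop x).mp h), PySem.Set.nodup_ofList _⟩)]
      intro a
      rw [PySem.Set.mem_ofList]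
      constructor
      · intro h
        rcases List.mem_cons.mp h with rfl | h
        · exact List.mem_cons_self
        · rw [← hsplit] at h
          rcases List.mem_append.mp h with h | h
          · rw [hrx a h]; exact List.mem_cons_self
          · exact List.mem_cons_of_mem _ ((PySem.Set.mem_ofList drop a).mpr h)
      · intro h
        rcases List.mem_cons.mp h with rfl | h
        · exact List.mem_cons_self
        · refine List.mem_cons_of_mem _ ?_
          rw [← hsplit]
          exact List.mem_append.mpr (Or.inr ((PySem.Set.mem_ofList drop a).mp h))
    have e1 : pvExpandRuns (x :: rest) = pvF x (run.length + 1) ++ pvExpandRuns drop := by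
      rw [pvExpandRuns]
      have hc : ((run.length : Int) + 1) = ((run.length + 1 : Nat) : Int) := by push_cast; ring
      rw [hc, pvRange_shift]
    have p2 : (pvF x (run.length + 1) ++ pvExpandRuns drop).Perm
        (pvF x (run.length + 1) ++ (PySem.Set.ofList drop : List Int).flatMap
          (fun k => pvF k (List.count k drop))) := (ih hpd).append_left _
    have e3 : pvF x (run.length + 1) ++ (PySem.Set.ofList drop : List Int).flatMap
          (fun k => pvF k (List.count k drop))
        = (x :: (PySem.Set.ofList drop : List Int)).flatMap
            (fun k => pvF k (List.count k (x :: rest))) := by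
      rw [List.flatMap_cons, hcx]
      congr 1
      refine (List.flatMap_congr (fun k hk => ?_)).symm
      rw [hck k ((PySem.Set.mem_ofList drop k).mp hk)]
    have p4 : ((x :: (PySem.Set.ofList drop : List Int)).flatMap
          (fun k => pvF k (List.count k (x :: rest)))).Perm
        ((PySem.Set.ofList (x :: rest) : List Int).flatMap
          (fun k => pvF k (List.count k (x :: rest)))) :=
      (hperm.flatMap (fun a _ => List.Perm.refl _)).symm
    rw [e1]
    refine p2.trans ?_
    rw [e3]
    exact p4

-- ===== VERDICT (by name: the statement is the Claim_ definition above) =====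
theorem deduplicate_copilots_ids_spec : Claim_equal_deduplicate_copilots_ids := by
  intro xs _
  unfold Spec_deduplicate_copilots_ids deduplicate_copilots_ids_alt
  rw [pvA_eq]
  set s := PySem.List.sorted xs (fun x => x) false with hs
  have hsp : s.Perm xs := PySem.List.sorted_perm xs (fun x => x) false
  have h1 : (pvExpandRuns s).Perm ((PySem.Set.ofList s : List Int).flatMap (fun k => pvF k (List.count k s))) :=
    pvExpandRuns_perm s (PySem.List.sorted_pairwise xs (fun x => x))
  have h2 : ((PySem.Set.ofList s : List Int).flatMap (fun k => pvF k (List.count k s))).Perm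
      ((PySem.Set.ofList xs : List Int).flatMap (fun k => pvF k (List.count k xs))) := by
    have hsets : (PySem.Set.ofList s : List Int).Perm (PySem.Set.ofList xs : List Int) := by
      rw [List.perm_ext_iff_of_nodup (PySem.Set.nodup_ofList _) (PySem.Set.nodup_ofList _)]
      intro a
      rw [PySem.Set.mem_ofList, PySem.Set.mem_ofList]
      exact ⟨fun h => hsp.mem_iff.mp h, fun h => hsp.mem_iff.mpr h⟩
    have := hsets.flatMap (f := fun k => pvF k (List.count k s))
      (g := fun k => pvF k (List.count k xs))
      (fun a _ => by dsimp only; rw [hsp.count_eq a])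
    exact this
  exact ((PySem.List.sorted_id_eq_sorted_id_iff_perm _ _).mpr (h1.trans h2)).symm
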